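-- pv_equiv track=rewrite | github.com/davidgbe/exfoliation | py_scripts/create_layered_mos2_sw.py | create_sw_file
-- ===== SOURCE A (Python) =====
-- from copy import deepcopy
--
-- def same_suffix(arr):
--     suffixes = list(map(lambda el: el[-1], arr))
--     first_suf = suffixes[0]
--     for suf in suffixes[1:]:
--         if suf != first_suf:
--             return False
--     return True
--
-- def remove_last_from_each(elements):
--     return list(map(lambda el: el[:-1], elements))
--
-- def create_tag(elements):
--     return ' '.join(elements)
--
-- def generate_orderings(available_types, n, curr_ordering=[]):
--     if len(curr_ordering) == n:
--         yield curr_ordering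
--     else:
--         for single_type in available_types:
--             new_ordering = deepcopy(curr_ordering)
--             new_ordering.append(single_type)
--             for child_ordering in generate_orderings(available_types, n, new_ordering):
--                 yield child_ordering
--
-- def create_sw_file(available_types, cached_values, default_value):
--     all_lines = []
--     for ordering in generate_orderings(available_types, 3):
--         tag = create_tag(remove_last_from_each(ordering[:3]))
--         if tag in cached_values and same_suffix(ordering[:3]):
--             all_lines.append(ordering + cached_values[tag])
--         else:
--             all_lines.append(ordering + default_value)
--     return all_lines
-- ===== SOURCE B (Python) =====
-- def create_sw_file(available_types, cached_values, default_value):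
--     all_lines = []
--     for a in available_types:
--         for b in available_types:
--             for c in available_types:
--                 tag = ' '.join((a[:-1], b[:-1], c[:-1]))
--                 if tag in cached_values and len({a[-1], b[-1], c[-1]}) == 1:
--                     all_lines.append([a, b, c] + cached_values[tag])
--                 else:
--                     all_lines.append([a, b, c] + default_value)
--     return all_lines
-- ===== Notes on version B (the rewrite author's own statement) =====
-- stated objective: simpler
-- what changed: Replaces the recursive generator generate_orderings (with deepcopy of the partial ordering at every step) and the three list-building helpers by three plain nested loops over available_types that build each line directly, with the tag and the uniform-suffix test inlined.
import Mathlib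
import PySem

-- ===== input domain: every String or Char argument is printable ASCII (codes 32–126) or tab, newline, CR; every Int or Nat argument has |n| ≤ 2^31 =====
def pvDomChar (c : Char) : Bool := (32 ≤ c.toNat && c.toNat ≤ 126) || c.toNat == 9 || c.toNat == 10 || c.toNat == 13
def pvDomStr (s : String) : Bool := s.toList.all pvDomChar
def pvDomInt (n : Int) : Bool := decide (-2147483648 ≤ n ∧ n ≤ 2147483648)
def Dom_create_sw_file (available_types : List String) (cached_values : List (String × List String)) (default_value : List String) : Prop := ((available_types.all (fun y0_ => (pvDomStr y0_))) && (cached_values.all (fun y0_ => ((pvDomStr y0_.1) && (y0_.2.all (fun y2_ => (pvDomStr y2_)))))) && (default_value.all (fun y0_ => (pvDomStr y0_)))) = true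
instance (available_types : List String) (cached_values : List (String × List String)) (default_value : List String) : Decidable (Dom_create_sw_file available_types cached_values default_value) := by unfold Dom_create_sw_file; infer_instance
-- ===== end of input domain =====

-- B replaces A's recursive ordering generator (with deepcopy) and its three helpers by three flat
-- nested loops building each line directly (objective: simpler).


-- ===== PORT A =====
-- same_suffix(arr): suffixes = [el[-1] for el in arr], compare all to the first.
-- arr is always a nonempty list here; el[-1] is PySem.Str.pyGet? (none = IndexError on "", excluded by Pre_).
def pvSameSuffix (arr : List String) : Bool :=
  let suffixes := arr.map (fun el => PySem.Str.pyGet? el (-1))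
  match suffixes with
  | [] => true          -- unreachable: A only calls same_suffix on 3-element lists
  | first_suf :: rest => rest.all (fun suf => suf == first_suf)

-- remove_last_from_each(elements)
def pvRemoveLastFromEach (elements : List String) : List String :=
  elements.map (fun el => PySem.Str.slice el none (some (-1)))

-- create_tag(elements)
def pvCreateTag (elements : List String) : String := PySem.Str.join " " elements

-- generate_orderings(available_types, n, curr_ordering): yields every length-n ordering.
-- Python recurses forever if len(curr) > n (never reached from curr = []); that branch returns [].
def pvGenOrderings (ats : List String) (n : Nat) (curr : List String) : List (List String) :=
  if curr.length = n then [curr]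
  else if h : curr.length < n then
    ats.flatMap (fun t => pvGenOrderings ats n (curr ++ [t]))
  else []
termination_by n - curr.length
decreasing_by simp only [List.length_append, List.length_cons, List.length_nil]; omega

def create_sw_file (available_types : List String) (cached_values : List (String × List String)) (default_value : List String) : List (List String) :=
  (pvGenOrderings available_types 3 []).foldl (fun all_lines ordering =>
    let tag := pvCreateTag (pvRemoveLastFromEach (PySem.List.slice ordering none (some 3)))
    if (PySem.Dict.mk cached_values).contains tag && pvSameSuffix (PySem.List.slice ordering none (some 3)) then
      all_lines ++ [ordering ++ (PySem.Dict.mk cached_values).getD tag []]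
    else
      all_lines ++ [ordering ++ default_value]) []

-- ===== PORT B =====
-- tag = ' '.join((a[:-1], b[:-1], c[:-1]))
def pvTag3 (a b c : String) : String :=
  PySem.Str.join " " [PySem.Str.slice a none (some (-1)), PySem.Str.slice b none (some (-1)), PySem.Str.slice c none (some (-1))]

def create_sw_file_alt (available_types : List String) (cached_values : List (String × List String)) (default_value : List String) : List (List String) :=
  available_types.flatMap (fun a =>
    available_types.flatMap (fun b =>
      available_types.map (fun c =>
        let tag := pvTag3 a b c
        if (PySem.Dict.mk cached_values).contains tag &&
           (PySem.Set.len (PySem.Set.ofList [PySem.Str.pyGet? a (-1), PySem.Str.pyGet? b (-1), PySem.Str.pyGet? c (-1)]) == 1) then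
          [a, b, c] ++ (PySem.Dict.mk cached_values).getD tag []
        else
          [a, b, c] ++ default_value)))

-- ===== PRECONDITION & SPEC =====
-- Pre_ excludes exactly the inputs on which Python A raises IndexError (in same_suffix, via el[-1] on
-- the empty string): some ordered triple of available types contains "" and its tag is a cached key.
def Pre_create_sw_file (available_types : List String) (cached_values : List (String × List String)) (default_value : List String) : Prop :=
  ∀ a ∈ available_types, ∀ b ∈ available_types, ∀ c ∈ available_types,
    (PySem.Dict.mk cached_values).contains (pvTag3 a b c) = true → a ≠ "" ∧ b ≠ "" ∧ c ≠ ""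
instance (available_types : List String) (cached_values : List (String × List String)) (default_value : List String) : Decidable (Pre_create_sw_file available_types cached_values default_value) := by unfold Pre_create_sw_file; infer_instance

def pvWitness_create_sw_file : List String × (List (String × List String)) × List String :=
  (["ab", "cb"], [("a c", ["X", "Y"])], ["D"])

def Spec_create_sw_file (available_types : List String) (cached_values : List (String × List String)) (default_value : List String) (out : List (List String)) : Prop := out = create_sw_file_alt available_types cached_values default_value
instance (available_types : List String) (cached_values : List (String × List String)) (default_value : List String) (out : List (List String)) : Decidable (Spec_create_sw_file available_types cached_values default_value out) := by unfold Spec_create_sw_file; infer_instance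

-- ===== CLAIM (what is proved, stated in full; the proofs are below) =====
def Claim_equal_create_sw_file : Prop := ∀ (available_types : List String) (cached_values : List (String × List String)) (default_value : List String), Dom_create_sw_file available_types cached_values default_value → Pre_create_sw_file available_types cached_values default_value → Spec_create_sw_file available_types cached_values default_value (create_sw_file available_types cached_values default_value)

-- ===== LEMMAS AND PROOFS =====

-- One step of pvGenOrderings below the target length.
theorem pvGenOrderings_step (ats : List String) (n : Nat) (curr : List String)
    (h : curr.length < n) :
    pvGenOrderings ats n curr = ats.flatMap (fun t => pvGenOrderings ats n (curr ++ [t])) := by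
  rw [pvGenOrderings]
  simp [Nat.ne_of_lt h, h]

theorem pvGenOrderings_done (ats : List String) (n : Nat) (curr : List String)
    (h : curr.length = n) : pvGenOrderings ats n curr = [curr] := by
  rw [pvGenOrderings]; simp [h]

-- The recursive generator with n = 3 enumerates the triple cartesian product, in order.
theorem pvGenOrderings_three (ats : List String) :
    pvGenOrderings ats 3 [] =
      ats.flatMap (fun a => ats.flatMap (fun b => ats.map (fun c => [a, b, c]))) := by
  rw [pvGenOrderings_step ats 3 [] (by simp)]
  refine List.flatMap_congr ?_
  intro a _
  rw [show ([] : List String) ++ [a] = [a] by simp,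
      pvGenOrderings_step ats 3 [a] (by simp)]
  refine List.flatMap_congr ?_
  intro b _
  rw [show [a] ++ [b] = [a, b] by simp, pvGenOrderings_step ats 3 [a, b] (by simp)]
  have h1 : ∀ t, pvGenOrderings ats 3 [a, b, t] = [[a, b, t]] := fun t =>
    pvGenOrderings_done ats 3 [a, b, t] (by simp)
  simp only [List.cons_append, List.nil_append, h1]
  exact Eq.symm List.map_eq_flatMap

-- foldl appending one element per item, branch outside the append, is a map.
theorem pvFoldlAppendIte {α β : Type} (p : α → Bool) (f g : α → β) (l : List α) (acc : List β) :
    l.foldl (fun acc x => if p x then acc ++ [f x] else acc ++ [g x]) acc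
      = acc ++ l.map (fun x => if p x then f x else g x) := by
  induction l generalizing acc with
  | nil => simp
  | cons x xs ih => by_cases h : p x <;> simp [h, ih]

-- A set built from three elements has one element iff all three are equal.
theorem pvSetOfThree_len_eq_one {α : Type} [BEq α] [LawfulBEq α] (x y z : α) :
    (PySem.Set.len (PySem.Set.ofList [x, y, z]) == 1) = ((y == x) && (z == x)) := by
  by_cases hyx : y = x <;> by_cases hzx : z = x <;> by_cases hzy : z = y <;>
    simp_all [PySem.Set.ofList, PySem.Set.add, PySem.Set.len, PySem.Set.contains]

-- ===== VERDICT (by name: the statement is the Claim_ definition above) =====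
theorem create_sw_file_spec : Claim_equal_create_sw_file := by
  intro ats cached dv _ _
  show _ = _
  rw [create_sw_file, pvGenOrderings_three, pvFoldlAppendIte]
  rw [create_sw_file_alt]
  simp only [List.map_flatMap, List.map_map]
  refine List.flatMap_congr ?_
  intro a _
  refine List.flatMap_congr ?_
  intro b _
  refine List.map_congr_left ?_
  intro c _
  simp only [Function.comp]
  have hslice : PySem.List.slice [a, b, c] none (some (3 : Int)) = [a, b, c] := by
    rw [show ((3 : Int) = ((3 : Nat) : Int)) by norm_num, PySem.List.slice_to_natCast]
    simp
  rw [hslice]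
  have htag : pvCreateTag (pvRemoveLastFromEach [a, b, c]) = pvTag3 a b c := by
    simp [pvCreateTag, pvRemoveLastFromEach, pvTag3]
  have hsuf : pvSameSuffix [a, b, c] =
      (PySem.Set.len (PySem.Set.ofList [PySem.Str.pyGet? a (-1), PySem.Str.pyGet? b (-1), PySem.Str.pyGet? c (-1)]) == 1) := by
    rw [pvSetOfThree_len_eq_one]
    simp [pvSameSuffix, Bool.and_comm]
  rw [htag, hsuf]
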